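-- pv_equiv track=rewrite | github.com/FilipBienkowski3/PythonBasics | Zestaw3/17.py | create_sum
-- ===== SOURCE A (Python) =====
-- def decimal_to_base(num, base, leng):
--     num_base = [0] * leng
--
--     for i in range(len(num_base) - 1, -1, -1):
--         num_base[i] = num % base
--         num //= base
--
--     return num_base
--
-- def create_sum(t1, t2, mask_num: int) -> int:
--     s = 0
--     mask = decimal_to_base(mask_num, 3, len(t1))
--
--     for i in range(len(t1)):
--         if mask[i] == 0:
--             s += t1[i]
--         elif mask[i] == 1:
--             s += t2[i]
--         elif mask[i] == 2:
--             s += t1[i] + t2[i]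
--
--     return s
-- ===== SOURCE B (Python) =====
-- def create_sum(t1, t2, mask_num: int) -> int:
--     # Different algorithm: start from sum(t1) (every position's digit-0 default)
--     # and apply CORRECTIONS only while digits remain: digit 1 swaps t1[i] for t2[i]
--     # (add t2[i]-t1[i]), digit 2 additionally adds t2[i]. Stops early once the
--     # running quotient is zero (all remaining digits are 0, so no correction).
--     s = sum(t1)
--     q = mask_num
--     i = len(t1) - 1
--     while q and i >= 0:
--         d = q % 3
--         q //= 3
--         if d == 1:
--             s += t2[i] - t1[i]
--         elif d == 2:
--             s += t2[i]
--         i -= 1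
--     return s
-- ===== Notes on version B (the rewrite author's own statement) =====
-- stated objective: faster
-- what changed: Replaces A's build-digit-array-then-select-per-position scan by a baseline-plus-corrections algorithm: start from sum(t1), then walk the base-3 digits of mask_num from the least significant (last index) applying only the corrections t2[i]-t1[i] (digit 1) or +t2[i] (digit 2), stopping early once the quotient is zero.
import Mathlib
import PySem

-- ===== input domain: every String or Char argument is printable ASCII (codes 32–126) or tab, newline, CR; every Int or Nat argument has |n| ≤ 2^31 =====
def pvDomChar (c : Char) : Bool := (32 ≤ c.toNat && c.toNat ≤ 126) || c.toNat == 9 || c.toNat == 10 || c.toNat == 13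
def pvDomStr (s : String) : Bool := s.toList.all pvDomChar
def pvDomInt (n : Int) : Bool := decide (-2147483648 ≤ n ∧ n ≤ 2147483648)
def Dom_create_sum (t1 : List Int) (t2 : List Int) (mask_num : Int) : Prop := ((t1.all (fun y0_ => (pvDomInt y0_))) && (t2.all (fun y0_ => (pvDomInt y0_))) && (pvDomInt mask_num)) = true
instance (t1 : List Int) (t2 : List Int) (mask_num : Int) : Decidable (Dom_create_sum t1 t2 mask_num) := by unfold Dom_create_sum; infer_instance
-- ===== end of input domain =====

-- B replaces A's build-digit-array-then-select scan by baseline-plus-corrections: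
-- start from sum(t1), then apply per-digit corrections while the quotient is nonzero.


-- ===== PORT A =====
-- the backward-filling loop of decimal_to_base: each step records num % base at the front
-- of what has been built so far and continues with num // base
def pvD2BLoop : Int → Int → Nat → List Int → List Int
  | _, _, 0, acc => acc
  | num, base, k+1, acc =>
      pvD2BLoop (PySem.Int.floordiv num base) base k (PySem.Int.mod num base :: acc)

def decimal_to_base (num base : Int) (leng : Nat) : List Int := pvD2BLoop num base leng []

def create_sum (t1 : List Int) (t2 : List Int) (mask_num : Int) : Int :=
  let mask := decimal_to_base mask_num 3 t1.length
  (List.range t1.length).foldl (fun (s : Int) (i : Nat) =>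
    let m := (PySem.List.pyGet? mask (i : Int)).getD 0
    if m = 0 then s + (PySem.List.pyGet? t1 (i : Int)).getD 0
    else if m = 1 then s + (PySem.List.pyGet? t2 (i : Int)).getD 0
    else if m = 2 then s + ((PySem.List.pyGet? t1 (i : Int)).getD 0 + (PySem.List.pyGet? t2 (i : Int)).getD 0)
    else s) 0

-- ===== PORT B =====
-- B's correction loop: k+1 indices left means current index i = k; stops when q = 0
def pvAltLoop (t1 t2 : List Int) : Nat → Int → Int → Int
  | 0, s, _ => s
  | k+1, s, q =>
      if q = 0 then s
      else
        let d := PySem.Int.mod q 3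
        let q' := PySem.Int.floordiv q 3
        let s' := if d = 1 then s + ((PySem.List.pyGet? t2 (k : Int)).getD 0 - (PySem.List.pyGet? t1 (k : Int)).getD 0)
                  else if d = 2 then s + (PySem.List.pyGet? t2 (k : Int)).getD 0
                  else s
        pvAltLoop t1 t2 k s' q'

def create_sum_alt (t1 : List Int) (t2 : List Int) (mask_num : Int) : Int :=
  pvAltLoop t1 t2 t1.length t1.sum mask_num

-- ===== PRECONDITION & SPEC =====
-- Pre_ excludes exactly the inputs where the Pythons raise IndexError: some position i
-- beyond len(t2) whose base-3 mask digit (digit i of the length-n representation is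
-- (mask_num // 3^(n-1-i)) % 3) is 1 or 2; both A and B raise there.
def Pre_create_sum (t1 : List Int) (t2 : List Int) (mask_num : Int) : Prop :=
  ∀ i : Nat, i < t1.length → t2.length ≤ i →
    PySem.Int.mod (PySem.Int.floordiv mask_num ((3:Int) ^ (t1.length - 1 - i))) 3 = 0
instance (t1 : List Int) (t2 : List Int) (mask_num : Int) : Decidable (Pre_create_sum t1 t2 mask_num) := by
  unfold Pre_create_sum; infer_instance

def pvWitness_create_sum : List Int × List Int × Int := ([1, 2], [3, 4], 5)

def Spec_create_sum (t1 : List Int) (t2 : List Int) (mask_num : Int) (out : Int) : Prop := out = create_sum_alt t1 t2 mask_num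
instance (t1 : List Int) (t2 : List Int) (mask_num : Int) (out : Int) : Decidable (Spec_create_sum t1 t2 mask_num out) := by unfold Spec_create_sum; infer_instance

-- ===== CLAIM (what is proved, stated in full; the proofs are below) =====
def Claim_equal_create_sum : Prop := ∀ (t1 : List Int) (t2 : List Int) (mask_num : Int), Dom_create_sum t1 t2 mask_num → Pre_create_sum t1 t2 mask_num → Spec_create_sum t1 t2 mask_num (create_sum t1 t2 mask_num)

-- ===== LEMMAS AND PROOFS =====

-- digit j (counting from the least significant) of the base-3 representation of q
def pvDigit (q : Int) (j : Nat) : Int := PySem.Int.mod (PySem.Int.floordiv q ((3:Int) ^ j)) 3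

-- the contribution of position i when its mask digit is d (A's branches)
def pvTerm (t1 t2 : List Int) (i : Nat) (d : Int) : Int :=
  if d = 0 then (PySem.List.pyGet? t1 (i : Int)).getD 0
  else if d = 1 then (PySem.List.pyGet? t2 (i : Int)).getD 0
  else (PySem.List.pyGet? t1 (i : Int)).getD 0 + (PySem.List.pyGet? t2 (i : Int)).getD 0

-- B's correction for position i under digit d
def pvCorr (t1 t2 : List Int) (i : Nat) (d : Int) : Int :=
  if d = 1 then (PySem.List.pyGet? t2 (i : Int)).getD 0 - (PySem.List.pyGet? t1 (i : Int)).getD 0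
  else if d = 2 then (PySem.List.pyGet? t2 (i : Int)).getD 0
  else 0

-- the contribution of position i as A computes it from its mask list
def pvGA (t1 t2 mask : List Int) (i : Nat) : Int :=
  if (PySem.List.pyGet? mask (i : Int)).getD 0 = 0 then (PySem.List.pyGet? t1 (i : Int)).getD 0
  else if (PySem.List.pyGet? mask (i : Int)).getD 0 = 1 then (PySem.List.pyGet? t2 (i : Int)).getD 0
  else if (PySem.List.pyGet? mask (i : Int)).getD 0 = 2 then (PySem.List.pyGet? t1 (i : Int)).getD 0 + (PySem.List.pyGet? t2 (i : Int)).getD 0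
  else 0

theorem pvDigit_floordiv (q : Int) (j : Nat) :
    pvDigit (PySem.Int.floordiv q 3) j = pvDigit q (j + 1) := by
  unfold pvDigit
  rw [PySem.Int.floordiv_eq_ediv_of_pos (by norm_num : (0:Int) < 3),
      PySem.Int.floordiv_eq_ediv_of_pos (by positivity : (0:Int) < (3:Int) ^ j),
      PySem.Int.floordiv_eq_ediv_of_pos (by positivity : (0:Int) < (3:Int) ^ (j + 1)),
      Int.ediv_ediv_of_nonneg (by norm_num : (0:Int) ≤ 3)]
  congr 2
  rw [pow_succ]; ring

theorem pvDigit_zero (q : Int) : pvDigit q 0 = PySem.Int.mod q 3 := by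
  unfold pvDigit
  rw [pow_zero, PySem.Int.floordiv_eq_ediv_of_pos (by norm_num : (0:Int) < 1), Int.ediv_one]

theorem pvDigit_of_zero (j : Nat) : pvDigit 0 j = 0 := by
  unfold pvDigit
  rw [PySem.Int.floordiv_eq_ediv_of_pos (by positivity : (0:Int) < (3:Int) ^ j)]
  simp [PySem.Int.mod]

theorem pvDigit_nonneg (q : Int) (j : Nat) : 0 ≤ pvDigit q j := by
  unfold pvDigit; exact PySem.Int.mod_nonneg _ (by norm_num)

theorem pvDigit_lt (q : Int) (j : Nat) : pvDigit q j < 3 := by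
  unfold pvDigit; exact PySem.Int.mod_lt _ (by norm_num)

theorem pvD2BLoop_acc (q : Int) (k : Nat) (acc : List Int) :
    pvD2BLoop q 3 k acc = pvD2BLoop q 3 k [] ++ acc := by
  induction k generalizing q acc with
  | zero => simp [pvD2BLoop]
  | succ k ih =>
      simp only [pvD2BLoop]
      rw [ih _ (PySem.Int.mod q 3 :: acc), ih _ [PySem.Int.mod q 3]]
      simp

theorem pvD2BLoop_length (q : Int) (k : Nat) : (pvD2BLoop q 3 k []).length = k := by
  induction k generalizing q with
  | zero => simp [pvD2BLoop]
  | succ k ih =>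
      simp only [pvD2BLoop]
      rw [pvD2BLoop_acc]
      simp [ih]

theorem pvD2BLoop_get (q : Int) (k i : Nat) (h : i < k) :
    (pvD2BLoop q 3 k [])[i]? = some (pvDigit q (k - 1 - i)) := by
  induction k generalizing q i with
  | zero => omega
  | succ k ih =>
      simp only [pvD2BLoop]
      rw [pvD2BLoop_acc]
      rcases Nat.lt_or_ge i k with hi | hi
      · rw [List.getElem?_append_left (by simpa [pvD2BLoop_length] using hi),
            ih _ _ hi, pvDigit_floordiv]
        have h1 : k - 1 - i + 1 = k + 1 - 1 - i := by omega
        rw [h1]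
      · have hik : i = k := by omega
        subst hik
        rw [List.getElem?_append_right (le_of_eq (pvD2BLoop_length _ _))]
        simp [pvD2BLoop_length, pvDigit_zero]

theorem pvAltLoop_eq (t1 t2 : List Int) (k : Nat) (s q : Int) :
    pvAltLoop t1 t2 k s q =
      s + ((List.range k).map (fun i => pvCorr t1 t2 i (pvDigit q (k - 1 - i)))).sum := by
  induction k generalizing s q with
  | zero => simp [pvAltLoop]
  | succ k ih =>
      simp only [pvAltLoop]
      by_cases hq : q = 0
      · subst hq
        simp only [if_pos rfl]
        have : ∀ i ∈ List.range (k+1), pvCorr t1 t2 i (pvDigit 0 (k + 1 - 1 - i)) = 0 := by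
          intro i _
          rw [pvDigit_of_zero]
          simp [pvCorr]
        rw [List.map_congr_left this]
        simp
      · rw [if_neg hq, ih]
        rw [List.range_succ, List.map_append, List.sum_append]
        simp only [List.map_cons, List.map_nil, List.sum_cons, List.sum_nil]
        have hmap : (List.range k).map
              (fun i => pvCorr t1 t2 i (pvDigit (PySem.Int.floordiv q 3) (k - 1 - i)))
            = (List.range k).map (fun i => pvCorr t1 t2 i (pvDigit q (k + 1 - 1 - i))) := by
          refine List.map_congr_left ?_
          intro i hi
          rw [List.mem_range] at hi
          rw [pvDigit_floordiv]
          have h1 : k - 1 - i + 1 = k + 1 - 1 - i := by omega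
          rw [h1]
        rw [hmap]
        have h0 : k + 1 - 1 - k = 0 := by omega
        rw [h0, pvDigit_zero]
        unfold pvCorr
        split_ifs <;> ring

theorem create_sum_eq_sum (t1 t2 : List Int) (m : Int) :
    create_sum t1 t2 m =
      ((List.range t1.length).map (fun i => pvTerm t1 t2 i (pvDigit m (t1.length - 1 - i)))).sum := by
  have hfun : (fun (s : Int) (i : Nat) =>
        if (PySem.List.pyGet? (decimal_to_base m 3 t1.length) (i : Int)).getD 0 = 0 then
          s + (PySem.List.pyGet? t1 (i : Int)).getD 0
        else if (PySem.List.pyGet? (decimal_to_base m 3 t1.length) (i : Int)).getD 0 = 1 then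
          s + (PySem.List.pyGet? t2 (i : Int)).getD 0
        else if (PySem.List.pyGet? (decimal_to_base m 3 t1.length) (i : Int)).getD 0 = 2 then
          s + ((PySem.List.pyGet? t1 (i : Int)).getD 0 + (PySem.List.pyGet? t2 (i : Int)).getD 0)
        else s)
      = (fun (s : Int) (i : Nat) => s + pvGA t1 t2 (decimal_to_base m 3 t1.length) i) := by
    funext s i
    simp only [pvGA]
    split_ifs <;> ring
  simp only [create_sum]
  rw [hfun, PySem.List.foldl_add, zero_add]
  refine congrArg List.sum (List.map_congr_left ?_)
  intro i hi
  rw [List.mem_range] at hi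
  have hmask : (PySem.List.pyGet? (decimal_to_base m 3 t1.length) (i : Int)).getD 0
      = pvDigit m (t1.length - 1 - i) := by
    rw [PySem.List.pyGet?_natCast]
    show (pvD2BLoop m 3 t1.length [])[i]?.getD 0 = _
    rw [pvD2BLoop_get m t1.length i hi]
    rfl
  have h0 := pvDigit_nonneg m (t1.length - 1 - i)
  have h3 := pvDigit_lt m (t1.length - 1 - i)
  unfold pvGA pvTerm
  rw [hmask]
  split_ifs <;> first | rfl | omega

theorem pvTerm_decomp (t1 t2 : List Int) (i : Nat) (d : Int) (h0 : 0 ≤ d) (h3 : d < 3) :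
    pvTerm t1 t2 i d = (PySem.List.pyGet? t1 (i : Int)).getD 0 + pvCorr t1 t2 i d := by
  have : d = 0 ∨ d = 1 ∨ d = 2 := by omega
  rcases this with h | h | h <;> subst h <;> simp [pvTerm, pvCorr] <;> ring

theorem pvRange_map_get (t1 : List Int) :
    (List.range t1.length).map (fun (i : Nat) => (PySem.List.pyGet? t1 (i : Int)).getD 0) = t1 := by
  refine List.ext_getElem (by simp) ?_
  intro i h1 h2
  simp only [List.getElem_map, List.getElem_range, PySem.List.pyGet?_natCast]
  simp_all

theorem pvSumMapAdd (l : List Nat) (f g : Nat → Int) :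
    (l.map (fun i => f i + g i)).sum = (l.map f).sum + (l.map g).sum := by
  induction l with
  | nil => simp
  | cons a l ih => simp only [List.map_cons, List.sum_cons]; rw [ih]; ring

-- ===== VERDICT (by name: the statement is the Claim_ definition above) =====
theorem create_sum_spec : Claim_equal_create_sum := by
  intro t1 t2 m _ _
  unfold Spec_create_sum create_sum_alt
  rw [create_sum_eq_sum, pvAltLoop_eq]
  have hterm : ∀ i ∈ List.range t1.length,
      pvTerm t1 t2 i (pvDigit m (t1.length - 1 - i))
        = (PySem.List.pyGet? t1 (i : Int)).getD 0 + pvCorr t1 t2 i (pvDigit m (t1.length - 1 - i)) := by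
    intro i _
    exact pvTerm_decomp _ _ _ _ (pvDigit_nonneg _ _) (pvDigit_lt _ _)
  rw [List.map_congr_left hterm, pvSumMapAdd]
  congr 1
  exact congrArg List.sum (pvRange_map_get t1)
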